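-- pv_equiv track=rewrite | github.com/scloew/advent_of_code-2022 | utils.py | is_adjacent
-- ===== SOURCE A (Python) =====
-- def is_adjacent(head, tail):
--     incs = tuple((i, j) for j in range(-1, 2) for i in range(-1, 2))
--     y, x = head
--     yt, xt = tail
--     for yi, xi in incs:
--         if (yt + yi, xt + xi) == (y, x):
--             return True
--     return False
-- ===== SOURCE B (Python) =====
-- def is_adjacent(head, tail):
--     y, x = head
--     yt, xt = tail
--     return abs(y - yt) <= 1 and abs(x - xt) <= 1
-- ===== Notes on version B (the rewrite author's own statement) =====
-- stated objective: simpler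
-- what changed: Replaces the 9-offset enumeration loop with a single closed-form Chebyshev-distance test abs(y-yt)<=1 and abs(x-xt)<=1.
import Mathlib
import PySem

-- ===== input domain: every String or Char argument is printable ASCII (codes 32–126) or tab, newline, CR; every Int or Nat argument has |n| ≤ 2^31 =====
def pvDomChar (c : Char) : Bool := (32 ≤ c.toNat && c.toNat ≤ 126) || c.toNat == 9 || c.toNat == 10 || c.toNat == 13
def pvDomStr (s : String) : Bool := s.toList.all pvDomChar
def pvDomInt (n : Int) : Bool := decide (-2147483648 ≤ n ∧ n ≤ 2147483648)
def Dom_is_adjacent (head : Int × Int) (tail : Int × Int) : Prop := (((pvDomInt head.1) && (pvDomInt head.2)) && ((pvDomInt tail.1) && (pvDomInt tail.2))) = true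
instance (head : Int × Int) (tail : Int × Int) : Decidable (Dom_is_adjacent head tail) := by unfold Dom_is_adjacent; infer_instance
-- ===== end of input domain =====

-- B replaces A's 9-offset enumeration loop by the closed-form Chebyshev test |y-yt| ≤ 1 ∧ |x-xt| ≤ 1 (simpler, same O(1) cost).

-- ===== PORT A =====
-- the early-returning for-loop over incs, as structural recursion over the offset list
def isAdjLoop (y x yt xt : Int) : List (Int × Int) → Bool
  | [] => false
  | (yi, xi) :: rest =>
      if yt + yi = y ∧ xt + xi = x then true else isAdjLoop y x yt xt rest

def is_adjacent (head : Int × Int) (tail : Int × Int) : Bool :=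
  -- incs = tuple((i, j) for j in range(-1,2) for i in range(-1,2))
  let incs : List (Int × Int) :=
    (PySem.List.pyRange (-1) 2 1).flatMap (fun j =>
      (PySem.List.pyRange (-1) 2 1).map (fun i => (i, j)))
  let y := head.1; let x := head.2
  let yt := tail.1; let xt := tail.2
  isAdjLoop y x yt xt incs

-- ===== PORT B =====
def is_adjacent_alt (head : Int × Int) (tail : Int × Int) : Bool :=
  let y := head.1; let x := head.2
  let yt := tail.1; let xt := tail.2
  (y - yt).natAbs ≤ 1 && (x - xt).natAbs ≤ 1

-- ===== PRECONDITION & SPEC =====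
def Spec_is_adjacent (head : Int × Int) (tail : Int × Int) (out : Bool) : Prop := out = is_adjacent_alt head tail
instance (head : Int × Int) (tail : Int × Int) (out : Bool) : Decidable (Spec_is_adjacent head tail out) := by unfold Spec_is_adjacent; infer_instance

-- ===== CLAIM (what is proved, stated in full; the proofs are below) =====
def Claim_equal_is_adjacent : Prop := ∀ (head : Int × Int) (tail : Int × Int), Dom_is_adjacent head tail → Spec_is_adjacent head tail (is_adjacent head tail)

-- ===== LEMMAS AND PROOFS =====
theorem is_adjacent_eq (head tail : Int × Int) : is_adjacent head tail = is_adjacent_alt head tail := by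
  obtain ⟨y, x⟩ := head
  obtain ⟨yt, xt⟩ := tail
  have hincs : ((PySem.List.pyRange (-1) 2 1).flatMap (fun j =>
      (PySem.List.pyRange (-1) 2 1).map (fun i => ((i : Int), (j : Int))))) =
      [(-1,-1),(0,-1),(1,-1),(-1,0),(0,0),(1,0),(-1,1),(0,1),(1,1)] := by decide
  simp only [is_adjacent, is_adjacent_alt, hincs, isAdjLoop]
  split_ifs <;> simp <;> omega

-- ===== VERDICT (by name: the statement is the Claim_ definition above) =====
theorem is_adjacent_spec : Claim_equal_is_adjacent := by
  intro head tail _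
  unfold Spec_is_adjacent
  exact is_adjacent_eq head tail
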